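-- pv_equiv track=rewrite | github.com/endale-bob/Competative_Programming | String Compression.py | compress
-- ===== SOURCE A (Python) =====
-- from typing import List
--
-- def compress(chars: List[str]) -> int:
--     l, r, result = 0, 0, 0
--     counter, tempInd = 0, 0
--     while(l < len(chars)):
--         if(r < len(chars) and chars[l] == chars[r] ):
--             r += 1
--             counter += 1
--         else:
--             chars[tempInd] = chars[l]
--             counter = str(counter)
--             if(int(counter) > 1):
--                 result += len(counter)
--                 for ch in counter:
--                     tempInd = tempInd + 1
--                     chars[tempInd] = ch
--
--             tempInd += 1
--             result += 1
--             l = r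
--             counter = 0
--
--     return result
-- ===== SOURCE B (Python) =====
-- from typing import List
--
-- def compress(chars: List[str]) -> int:
--     # Two-phase approach: first materialize consecutive runs as (char, count)
--     # pairs, then a separate write pass mutates chars in place with a single
--     # write index, which is returned as the compressed length.
--     runs = []
--     i, n = 0, len(chars)
--     while i < n:
--         j = i + 1
--         while j < n and chars[j] == chars[i]:
--             j += 1
--         runs.append((chars[i], j - i))
--         i = j
--     w = 0
--     for ch, c in runs:
--         chars[w] = ch
--         w += 1
--         if c > 1:
--             for d in str(c):
--                 chars[w] = d
--                 w += 1
--     return w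
-- ===== Notes on version B (the rewrite author's own statement) =====
-- stated objective: idiomatic
-- what changed: A's single while-loop that interleaves run counting, digit writing and length bookkeeping across five mutable indices is replaced by two phases: first collect the consecutive runs as (char, count) pairs, then a separate write pass with a single write index whose final value is returned.
import Mathlib
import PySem

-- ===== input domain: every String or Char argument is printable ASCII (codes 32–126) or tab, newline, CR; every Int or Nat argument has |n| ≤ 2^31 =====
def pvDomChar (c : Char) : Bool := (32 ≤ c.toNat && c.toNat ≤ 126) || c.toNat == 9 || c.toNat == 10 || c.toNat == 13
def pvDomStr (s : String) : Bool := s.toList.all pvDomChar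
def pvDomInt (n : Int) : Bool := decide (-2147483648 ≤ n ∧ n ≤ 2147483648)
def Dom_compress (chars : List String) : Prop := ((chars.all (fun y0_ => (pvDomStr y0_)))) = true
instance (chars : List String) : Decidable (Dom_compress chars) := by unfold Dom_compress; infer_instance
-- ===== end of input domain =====

-- B replaces A's single interleaved scan/count/write loop by two phases (collect runs, then
-- one write pass); the equivalence proved is about the RETURN value only (both Pythons also
-- mutate `chars` in place identically, but that side effect is not modelled here).

-- ===== PORT A =====
-- The while-loop, made total with fuel; 2*len+1 steps always suffice (each iteration
-- either advances r, at most len times, or closes a run, at most len runs).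
def compressLoop : Nat → List String → Nat → Nat → Int → Nat → Nat → Int
  | 0, _, _, _, result, _, _ => result
  | fuel + 1, chars, l, r, result, counter, tempInd =>
    if l < chars.length then
      if r < chars.length ∧ chars.getD l "" = chars.getD r "" then
        compressLoop fuel chars l (r + 1) result (counter + 1) tempInd
      else
        -- chars[tempInd] = chars[l]; writes are always in range (exact, see proof invariant)
        let chars1 := chars.set tempInd (chars.getD l "")
        let s := PySem.Int.toStr (counter : Int)
        if 1 < (counter : Int) then
          let st := s.toList.foldl
            (fun (p : Nat × List String) ch => (p.1 + 1, p.2.set (p.1 + 1) (String.ofList [ch])))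
            (tempInd, chars1)
          compressLoop fuel st.2 r r (result + PySem.Str.len s + 1) 0 (st.1 + 1)
        else
          compressLoop fuel chars1 r r (result + 1) 0 (tempInd + 1)
    else result

def compress (chars : List String) : Int :=
  compressLoop (2 * chars.length + 1) chars 0 0 0 0 0

-- ===== PORT B =====
-- phase 1 of Source B: collect consecutive runs as (element, count) pairs
-- (the index scan i/j of Source B becomes the obvious takeWhile/dropWhile recursion)
def runsB : List String → List (String × Nat)
  | [] => []
  | x :: xs =>
      (x, (xs.takeWhile (fun y => y == x)).length + 1) ::
        runsB (xs.dropWhile (fun y => y == x))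
  termination_by xs => xs.length
  decreasing_by simpa using Nat.lt_succ_of_le (List.length_dropWhile_le _ _)

-- phase 2 of Source B: the write pass; only the write index w (the return value) is modelled
def compress_alt (chars : List String) : Int :=
  (runsB chars).foldl
    (fun w p =>
      let w := w + 1
      if 1 < p.2 then (PySem.Int.toStr (p.2 : Int)).toList.foldl (fun w _ => w + 1) w else w)
    0

-- ===== PRECONDITION & SPEC =====
def Spec_compress (chars : List String) (out : Int) : Prop := out = compress_alt chars
instance (chars : List String) (out : Int) : Decidable (Spec_compress chars out) := by unfold Spec_compress; infer_instance

-- ===== CLAIM (what is proved, stated in full; the proofs are below) =====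
def Claim_equal_compress : Prop := ∀ (chars : List String), Dom_compress chars → Spec_compress chars (compress chars)

-- ===== LEMMAS AND PROOFS =====

-- per-run contribution to the compressed length
def runCost (p : String × Nat) : Int :=
  1 + (if 1 < p.2 then ((PySem.Int.toChars (p.2 : Int)).length : Int) else 0)

lemma foldl_add_one (cs : List Char) : ∀ (w : Int),
    cs.foldl (fun w _ => w + 1) w = w + cs.length := by
  induction cs with
  | nil => intro w; simp
  | cons c cs ih => intro w; simp [List.foldl_cons, ih]; ring

lemma fold_cost (rs : List (String × Nat)) : ∀ (a : Int),
    rs.foldl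
      (fun w p =>
        let w := w + 1
        if 1 < p.2 then (PySem.Int.toStr (p.2 : Int)).toList.foldl (fun w _ => w + 1) w else w)
      a = a + (rs.map runCost).sum := by
  induction rs with
  | nil => intro a; simp
  | cons p rs ih =>
    intro a
    simp only [List.foldl_cons, List.map_cons, List.sum_cons]
    rw [ih]
    by_cases h : 1 < p.2
    · simp only [if_pos h, runCost, foldl_add_one, PySem.Int.toList_toStr]
      ring
    · simp only [if_neg h, runCost]
      ring

lemma alt_eq (chars : List String) :
    compress_alt chars = ((runsB chars).map runCost).sum := by
  unfold compress_alt
  simpa using fold_cost (runsB chars) 0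

lemma loop_exit (fuel : Nat) (chars : List String) (l r : Nat) (result : Int)
    (counter tempInd : Nat) (h : chars.length ≤ l) :
    compressLoop fuel chars l r result counter tempInd = result := by
  cases fuel <;> simp [compressLoop, Nat.not_lt.mpr h]

lemma getD_drop (chars : List String) (l i : Nat) :
    chars.getD (l + i) "" = (chars.drop l).getD i "" := by
  simp [List.getD_eq_getElem?_getD, List.getElem?_drop]

lemma takeWhile_getD (x : String) (t : List String) :
    ∀ j, j < (t.takeWhile (fun y => y == x)).length → t.getD j "" = x := by
  induction t with
  | nil => intro j h; simp [List.takeWhile] at h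
  | cons y t ih =>
    intro j h
    by_cases hy : y = x
    · subst hy
      cases j with
      | zero => simp
      | succ j =>
        simp at h
        simpa [List.getD] using ih j (by omega)
    · simp [beq_eq_false_iff_ne.mpr hy] at h

lemma dropWhile_head_not {α : Type} (p : α → Bool) :
    ∀ (t : List α) (h : α) (u : List α), t.dropWhile p = h :: u → p h = false := by
  intro t h u hcons
  induction t with
  | nil => simp [List.dropWhile] at hcons
  | cons y t ih =>
    rw [List.dropWhile_cons] at hcons
    by_cases hy : p y
    · simp [hy] at hcons; exact ih hcons
    · simp [hy] at hcons; rw [← hcons.1]; simpa using hy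

-- the digit-writing fold: final index, preserved length, untouched suffix
lemma writeFold (cs : List Char) : ∀ (t0 : Nat) (l0 : List String),
    (cs.foldl (fun (p : Nat × List String) ch => (p.1 + 1, p.2.set (p.1 + 1) (String.ofList [ch])))
        (t0, l0)).1 = t0 + cs.length ∧
    (cs.foldl (fun (p : Nat × List String) ch => (p.1 + 1, p.2.set (p.1 + 1) (String.ofList [ch])))
        (t0, l0)).2.length = l0.length ∧
    ∀ d, t0 + cs.length < d →
      (cs.foldl (fun (p : Nat × List String) ch => (p.1 + 1, p.2.set (p.1 + 1) (String.ofList [ch])))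
          (t0, l0)).2.drop d = l0.drop d := by
  induction cs with
  | nil => intro t0 l0; refine ⟨by simp, by simp, by intro d _; simp⟩
  | cons c cs ih =>
    intro t0 l0
    obtain ⟨h1, h2, h3⟩ := ih (t0 + 1) (l0.set (t0 + 1) (String.ofList [c]))
    refine ⟨?_, ?_, ?_⟩
    · rw [List.foldl_cons, h1]; simp only [List.length_cons]; omega
    · simpa [List.length_set] using h2
    · intro d hd
      rw [List.foldl_cons]
      have := h3 d (by simp at hd ⊢; omega)
      rw [this, List.drop_set]
      rw [if_pos (show t0 + 1 < d by simp at hd; omega)]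

lemma lt_ten_pow (n : Nat) (h : 2 ≤ n) : n < 10 ^ (n - 1) := by
  induction n with
  | zero => omega
  | succ m ih =>
    by_cases hm : 2 ≤ m
    · have h1 := ih hm
      have h0 : 1 ≤ 10 ^ (m - 1) := Nat.one_le_pow _ _ (by omega)
      have h2 : 10 ^ (m - 1) * 10 = 10 ^ m := by
        rw [← pow_succ]; congr 1; omega
      have h3 : m + 1 - 1 = m := by omega
      rw [h3]
      omega
    · have hm1 : m = 1 := by omega
      subst hm1; decide

lemma digits_le (k : Nat) (h : 2 ≤ k) :
    (PySem.Int.toChars (k : Int)).length ≤ k - 1 := by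
  have : ¬ ((k : Int) < 0) := by omega
  simp only [PySem.Int.toChars, if_neg this, Int.toNat_natCast]
  exact Nat.toDigits_length 10 k (k - 1) (by omega) (lt_ten_pow k h)

-- the counting phase: from (l, l+m, counter=m) the loop runs the if-branch up to (l, l+k, counter=k)
lemma loop_count (chars : List String) (l : Nat) (x : String) (k : Nat)
    (hall : ∀ i, i < k → chars.getD (l + i) "" = x)
    (hlk : l + k ≤ chars.length) :
    ∀ (d m : Nat) (fuel : Nat) (result : Int) (tempInd : Nat), m + d = k →
    compressLoop (d + fuel) chars l (l + m) result m tempInd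
      = compressLoop fuel chars l (l + k) result k tempInd := by
  intro d
  induction d with
  | zero =>
    intro m fuel result tempInd hm
    have : m = k := by omega
    subst this
    simp
  | succ d ih =>
    intro m fuel result tempInd hm
    have hstep : d + 1 + fuel = (d + fuel) + 1 := by omega
    rw [hstep]
    have hl : l < chars.length := by omega
    have hcond : l + m < chars.length ∧ chars.getD l "" = chars.getD (l + m) "" := by
      refine ⟨by omega, ?_⟩
      have h0 := hall 0 (by omega)
      have hm' := hall m (by omega)
      simp only [Nat.add_zero] at h0
      rw [h0, hm']
    simp only [compressLoop, if_pos hl, if_pos hcond]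
    have h1 : l + m + 1 = l + (m + 1) := by omega
    rw [h1]
    exact ih (m + 1) fuel result tempInd (by omega)

-- main invariant: at a run boundary (r = l, counter = 0, writes so far all below tempInd ≤ l)
-- the loop returns result + encoded length of the remaining suffix ys = chars.drop l
lemma loop_main : ∀ (n : Nat) (ys chars : List String) (l tempInd : Nat) (result : Int) (fuel : Nat),
    ys.length ≤ n →
    chars.drop l = ys →
    chars.length = l + ys.length →
    tempInd ≤ l →
    2 * ys.length ≤ fuel →
    compressLoop fuel chars l l result 0 tempInd = result + ((runsB ys).map runCost).sum := by
  intro n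
  induction n with
  | zero =>
    intro ys chars l tempInd result fuel h0 hdrop hlen ht hf
    have hnil : ys = [] := List.eq_nil_of_length_eq_zero (by omega)
    subst hnil
    rw [loop_exit _ _ _ _ _ _ _ (by omega)]
    simp [runsB]
  | succ n ih =>
    intro ys chars l tempInd result fuel h0 hdrop hlen ht hf
    cases ys with
    | nil =>
      rw [loop_exit _ _ _ _ _ _ _ (by simp at hlen; omega)]
      simp [runsB]
    | cons x t =>
      have hlen' : chars.length = l + (t.length + 1) := by simpa using hlen
      have hl : l < chars.length := by omega
      have htw : t = t.takeWhile (fun y => y == x) ++ t.dropWhile (fun y => y == x) :=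
        (List.takeWhile_append_dropWhile).symm
      set tw := t.takeWhile (fun y => y == x) with htwdef
      set dw := t.dropWhile (fun y => y == x) with hdwdef
      set k := tw.length + 1 with hkdef
      have htlen : t.length = tw.length + dw.length := by
        conv_lhs => rw [htw]
        simp
      have hk1 : 1 ≤ k := by omega
      have hkt : k ≤ t.length + 1 := by omega
      -- elements of the run
      have hgetD : ∀ i, chars.getD (l + i) "" = (x :: t).getD i "" := by
        intro i; rw [getD_drop, hdrop]
      have hx : chars.getD l "" = x := by
        have := hgetD 0
        simpa using this
      have hall : ∀ i, i < k → chars.getD (l + i) "" = x := by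
        intro i hi
        rw [hgetD]
        cases i with
        | zero => simp
        | succ j =>
          have hj : j < tw.length := by omega
          simpa [List.getD] using takeWhile_getD x t j hj
      have hlk : l + k ≤ chars.length := by omega
      -- the boundary: either the list ends at l+k or the next element differs
      have hend : chars.length = l + k ∨ chars.getD (l + k) "" ≠ x := by
        cases hdw : dw with
        | nil =>
          left
          have : tw = t := by
            have := htw; rw [hdw] at this; simpa using this.symm
          have hlt : tw.length = t.length := by rw [this]
          omega
        | cons h u =>
          right
          have hh : (fun y => y == x) h = false := dropWhile_head_not _ t h u hdw
          have hne : h ≠ x := by simpa using hh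
          have : chars.getD (l + k) "" = h := by
            rw [hgetD]
            have : (x :: t).getD k "" = t.getD tw.length "" := by
              simp [List.getD, hkdef]
            rw [this, List.getD_eq_getElem?_getD]
            conv_lhs => rw [htw, hdw]
            rw [List.getElem?_append_right (by omega)]
            simp
          rw [this]
          exact hne
      -- run the counting phase: k if-steps
      have hfk : fuel = k + ((fuel - (k + 1)) + 1) := by omega
      rw [hfk]
      have hcount := loop_count chars l x k hall hlk k 0 ((fuel - (k + 1)) + 1) result tempInd (by omega)
      simp only [Nat.add_zero] at hcount
      rw [hcount]
      -- one else-step closes the run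
      have hcondF : ¬ (l + k < chars.length ∧ chars.getD l "" = chars.getD (l + k) "") := by
        rcases hend with he | he
        · intro hc; omega
        · intro hc; exact he (hc.2.symm.trans hx)
      simp only [compressLoop, if_pos hl, if_neg hcondF]
      have hruns : runsB (x :: t) = (x, k) :: runsB dw := by
        rw [runsB]
      by_cases hk2 : 1 < ((k : Nat) : Int)
      · -- multi-element run: the digit-writing inner loop
        have hk2' : 2 ≤ k := by exact_mod_cast hk2
        rw [if_pos hk2]
        set cs := (PySem.Int.toStr ((k : Nat) : Int)).toList with hcs
        have hcsD : cs.length = (PySem.Int.toChars ((k : Nat) : Int)).length := by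
          rw [hcs, PySem.Int.toList_toStr]
        have hD : cs.length ≤ k - 1 := by
          rw [hcsD]; exact digits_le k hk2'
        set st := cs.foldl
            (fun (p : Nat × List String) ch => (p.1 + 1, p.2.set (p.1 + 1) (String.ofList [ch])))
            (tempInd, chars.set tempInd (chars.getD l "")) with hst
        obtain ⟨hw1, hw2, hw3⟩ := writeFold cs tempInd (chars.set tempInd (chars.getD l ""))
        rw [← hst] at hw1 hw2 hw3
        have hdropS : st.2.drop (l + k) = dw := by
          rw [hw3 (l + k) (by omega), List.drop_set, if_pos (by omega)]
          calc chars.drop (l + k) = (chars.drop l).drop k := by rw [List.drop_drop]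
            _ = t.drop tw.length := by rw [hdrop]; simp [hkdef]
            _ = dw := by conv_lhs => rw [htw]
                         exact List.drop_left
        have hlenS2 : st.2.length = (l + k) + dw.length := by
          rw [hw2]; simp only [List.length_set]; omega
        rw [ih dw st.2 (l + k) (st.1 + 1)
          (result + PySem.Str.len (PySem.Int.toStr ((k : Nat) : Int)) + 1) (fuel - (k + 1))
          (by omega) hdropS hlenS2 (by omega) (by omega)]
        rw [hruns]
        have hlenS : PySem.Str.len (PySem.Int.toStr ((k : Nat) : Int)) = (cs.length : Int) := by
          simp [PySem.Str.len, hcs]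
        rw [hlenS]
        simp only [List.map_cons, List.sum_cons, runCost,
          if_pos (show 1 < k by exact_mod_cast hk2), ← hcsD]
        ring
      · -- run of length 1
        have hk1' : k = 1 := by
          have : ¬ (1 < k) := by exact_mod_cast hk2
          omega
        rw [if_neg hk2]
        have htw0 : tw = [] := List.eq_nil_of_length_eq_zero (by omega)
        have hdw1 : dw = t := by
          rw [htw0] at htw; simpa using htw.symm
        have hdropS : (chars.set tempInd (chars.getD l "")).drop (l + k) = t := by
          rw [List.drop_set, if_pos (by omega), hk1']
          calc chars.drop (l + 1) = (chars.drop l).drop 1 := by rw [List.drop_drop]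
            _ = t := by rw [hdrop]; simp
        have hlenS2 : (chars.set tempInd (chars.getD l "")).length = (l + k) + t.length := by
          simp only [List.length_set]; omega
        rw [ih t (chars.set tempInd (chars.getD l "")) (l + k) (tempInd + 1) (result + 1)
          (fuel - (k + 1)) (by omega) hdropS hlenS2 (by omega) (by omega)]
        rw [hruns, hdw1]
        simp only [List.map_cons, List.sum_cons, runCost, if_neg (show ¬ (1 < k) by omega)]
        ring

-- ===== VERDICT (by name: the statement is the Claim_ definition above) =====
theorem compress_spec : Claim_equal_compress := by
  intro chars _
  unfold Spec_compress compress
  rw [alt_eq]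
  simpa using loop_main chars.length chars chars 0 0 0 (2 * chars.length + 1)
    (le_refl _) (by simp) (by simp) (le_refl _) (by omega)
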